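-- pv_equiv track=rewrite | github.com/karabin248/Hyperflow | hyperflow/config.py | _decompose_sequence_with_atoms
-- ===== SOURCE A (Python) =====
-- def _decompose_sequence_with_atoms(sequence: str, atomic_keys: tuple[str, ...]) -> tuple[list[str], list[str]]:
--     resolved: list[str] = []
--     unresolved: list[str] = []
--     i = 0
--     while i < len(sequence):
--         matched = None
--         for atom in atomic_keys:
--             if sequence.startswith(atom, i):
--                 matched = atom
--                 break
--         if matched is not None:
--             resolved.append(matched)
--             i += len(matched)
--         else:
--             unresolved.append(sequence[i])
--             i += 1
--     return resolved, unresolved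
-- ===== SOURCE B (Python) =====
-- def _decompose_sequence_with_atoms(sequence: str, atomic_keys: tuple[str, ...]) -> tuple[list[str], list[str]]:
--     # Hash-index algorithm: a dict maps each atom to its first (minimal) tuple
--     # index; at every position only the slices of the distinct atom lengths are
--     # looked up, and the candidate with the smallest original index is taken --
--     # the same atom A's first-match scan picks, without scanning the key tuple.
--     prio: dict[str, int] = {}
--     for idx, atom in enumerate(atomic_keys):
--         if atom not in prio:
--             prio[atom] = idx
--     lengths = sorted({len(a) for a in atomic_keys if a})
--     resolved: list[str] = []
--     unresolved: list[str] = []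
--     i = 0
--     n = len(sequence)
--     while i < n:
--         best = None
--         for l in lengths:
--             if i + l <= n:
--                 piece = sequence[i:i + l]
--                 j = prio.get(piece)
--                 if j is not None and (best is None or j < best[0]):
--                     best = (j, piece)
--         if best is None:
--             unresolved.append(sequence[i])
--             i += 1
--         else:
--             resolved.append(best[1])
--             i += len(best[1])
--     return resolved, unresolved
-- ===== Notes on version B (the rewrite author's own statement) =====
-- stated objective: faster
-- what changed: B builds a dict mapping each atom to its first tuple index once and, at every position, looks up only the slices of the distinct atom lengths, taking the candidate with minimal original index, instead of scanning the whole key tuple with startswith.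
import Mathlib
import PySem

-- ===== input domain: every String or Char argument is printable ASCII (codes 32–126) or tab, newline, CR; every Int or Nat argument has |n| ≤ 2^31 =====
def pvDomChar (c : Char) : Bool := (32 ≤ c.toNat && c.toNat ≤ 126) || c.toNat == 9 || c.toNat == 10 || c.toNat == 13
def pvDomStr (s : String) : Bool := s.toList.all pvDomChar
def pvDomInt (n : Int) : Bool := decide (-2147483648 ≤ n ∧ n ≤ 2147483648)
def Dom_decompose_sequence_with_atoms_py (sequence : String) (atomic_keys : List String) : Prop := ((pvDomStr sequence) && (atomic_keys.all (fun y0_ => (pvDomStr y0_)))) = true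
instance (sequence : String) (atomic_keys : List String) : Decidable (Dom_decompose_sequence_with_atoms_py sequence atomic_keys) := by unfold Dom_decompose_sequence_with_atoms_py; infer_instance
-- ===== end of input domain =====

-- B replaces A's per-position scan of the whole key tuple by a dict mapping each atom to its first
-- tuple index plus lookups of the distinct atom lengths' slices, taking the minimal-index candidate.


-- ===== PORT A =====
-- inner `for atom in atomic_keys: if sequence.startswith(atom, i): matched = atom; break`
def pvFindAtomA (rest : List Char) : List String → Option String
  | [] => none
  | a :: as => if a.toList.isPrefixOf rest then some a else pvFindAtomA rest as

-- A's while-loop; `rest` is sequence[i:]; fuel = |sequence| suffices whenever every match is nonempty.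
def pvLoopA (atoms : List String) : Nat → List Char → List String → List String → List String × List String
  | 0, _, res, unres => (res, unres)
  | _ + 1, [], res, unres => (res, unres)
  | fuel + 1, c :: cs, res, unres =>
    match pvFindAtomA (c :: cs) atoms with
    | some a => pvLoopA atoms fuel ((c :: cs).drop a.toList.length) (res ++ [a]) unres
    | none => pvLoopA atoms fuel cs res (unres ++ [String.ofList [c]])

def decompose_sequence_with_atoms_py (sequence : String) (atomic_keys : List String) : List String × List String :=
  pvLoopA atomic_keys sequence.toList.length sequence.toList [] []

-- ===== PORT B =====
-- `for idx, atom in enumerate(atomic_keys): if atom not in prio: prio[atom] = idx`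
def pvBuildPrio : List String → Nat → PySem.Dict String Int → PySem.Dict String Int
  | [], _, d => d
  | a :: as, idx, d => pvBuildPrio as (idx + 1) (if d.contains a then d else d.insert a (idx : Int))

-- `lengths = sorted({len(a) for a in atomic_keys if a})`
def pvLengths (atoms : List String) : List Nat :=
  PySem.List.sorted (PySem.Set.ofList ((atoms.filter (fun a => !a.toList.isEmpty)).map (fun a => a.toList.length))) (fun x => x) false

-- body of `for l in lengths: if i + l <= n: j = prio.get(piece); if j is not None and (best is None or j < best[0]): best = (j, piece)`
def pvStepB (prio : PySem.Dict String Int) (rest : List Char) (best : Option (Int × String)) (l : Nat) : Option (Int × String) :=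
  if l ≤ rest.length then
    match prio.get? (String.ofList (rest.take l)) with
    | some j =>
      match best with
      | none => some (j, String.ofList (rest.take l))
      | some (bj, bs) => if j < bj then some (j, String.ofList (rest.take l)) else some (bj, bs)
    | none => best
  else best

def pvBestB (prio : PySem.Dict String Int) (rest : List Char) (lengths : List Nat) : Option (Int × String) :=
  lengths.foldl (pvStepB prio rest) none

-- B's while-loop
def pvLoopB (prio : PySem.Dict String Int) (lengths : List Nat) : Nat → List Char → List String → List String → List String × List String
  | 0, _, res, unres => (res, unres)
  | _ + 1, [], res, unres => (res, unres)
  | fuel + 1, c :: cs, res, unres =>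
    match pvBestB prio (c :: cs) lengths with
    | some (_, b) => pvLoopB prio lengths fuel ((c :: cs).drop b.toList.length) (res ++ [b]) unres
    | none => pvLoopB prio lengths fuel cs res (unres ++ [String.ofList [c]])

def decompose_sequence_with_atoms_py_alt (sequence : String) (atomic_keys : List String) : List String × List String :=
  pvLoopB (pvBuildPrio atomic_keys 0 PySem.Dict.empty) (pvLengths atomic_keys) sequence.toList.length sequence.toList [] []

-- ===== PRECONDITION & SPEC =====
-- Pre_ excludes exactly the inputs on which A never returns: a nonempty sequence with "" among the
-- atomic keys makes A's while-loop advance by 0 forever (startswith("", i) is always True).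
def Pre_decompose_sequence_with_atoms_py (sequence : String) (atomic_keys : List String) : Prop :=
  sequence = "" ∨ "" ∉ atomic_keys
instance (sequence : String) (atomic_keys : List String) : Decidable (Pre_decompose_sequence_with_atoms_py sequence atomic_keys) := by unfold Pre_decompose_sequence_with_atoms_py; infer_instance

def pvWitness_decompose_sequence_with_atoms_py : String × List String := ("abcab", ["ab", "c"])

def Spec_decompose_sequence_with_atoms_py (sequence : String) (atomic_keys : List String) (out : List String × List String) : Prop := out = decompose_sequence_with_atoms_py_alt sequence atomic_keys
instance (sequence : String) (atomic_keys : List String) (out : List String × List String) : Decidable (Spec_decompose_sequence_with_atoms_py sequence atomic_keys out) := by unfold Spec_decompose_sequence_with_atoms_py; infer_instance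

-- ===== CLAIM (what is proved, stated in full; the proofs are below) =====
def Claim_equal_decompose_sequence_with_atoms_py : Prop := ∀ (sequence : String) (atomic_keys : List String), Dom_decompose_sequence_with_atoms_py sequence atomic_keys → Pre_decompose_sequence_with_atoms_py sequence atomic_keys → Spec_decompose_sequence_with_atoms_py sequence atomic_keys (decompose_sequence_with_atoms_py sequence atomic_keys)

-- ===== LEMMAS AND PROOFS =====

-- first index of an exact occurrence of `b` in `atoms`, counting from `k` (proof-side view of prio)
def pvFIdx : List String → Nat → String → Option Int
  | [], _, _ => none
  | a :: as, k, b => if a = b then some (k : Int) else pvFIdx as (k + 1) b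

-- first index of a prefix match, counting from `k` (proof-side view of A's scan)
def pvMIdx : List String → Nat → List Char → Option (Int × String)
  | [], _, _ => none
  | a :: as, k, rest => if a.toList.isPrefixOf rest then some ((k : Int), a) else pvMIdx as (k + 1) rest

theorem pvBuildPrio_get (b : String) : ∀ (atoms : List String) (k : Nat) (d : PySem.Dict String Int),
    (pvBuildPrio atoms k d).get? b = match d.get? b with | some v => some v | none => pvFIdx atoms k b := by
  intro atoms
  induction atoms with
  | nil => intro k d; cases hd : d.get? b <;> simp [pvBuildPrio, pvFIdx, hd]
  | cons a as ih =>
    intro k d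
    simp only [pvBuildPrio]
    by_cases hc : d.contains a
    · rw [if_pos hc, ih]
      cases hd : d.get? b with
      | some v => rfl
      | none =>
        have hab : a ≠ b := by
          intro h; subst h
          rw [PySem.Dict.contains_eq_isSome_get?, hd] at hc; simp at hc
        simp [pvFIdx, hab]
    · rw [if_neg hc, ih]
      by_cases hab : a = b
      · subst hab
        have hd : d.get? a = none := by
          rw [PySem.Dict.contains_eq_isSome_get?] at hc
          cases h : d.get? a <;> simp [h] at hc ⊢
        simp [PySem.Dict.get?_insert_self, hd, pvFIdx]
      · rw [PySem.Dict.get?_insert_of_ne _ _ (fun h => hab h.symm)]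
        cases hd : d.get? b with
        | some v => rfl
        | none => simp [pvFIdx, hab]

theorem pvFIdx_lb {atoms : List String} {k : Nat} {b : String} {j : Int}
    (h : pvFIdx atoms k b = some j) : (k : Int) ≤ j := by
  induction atoms generalizing k with
  | nil => simp [pvFIdx] at h
  | cons a as ih =>
    simp only [pvFIdx] at h
    split at h
    · injection h with h'; omega
    · have := ih h; push_cast at this ⊢; omega

theorem pvMIdx_fIdx {atoms : List String} {k : Nat} {rest : List Char} {j : Int} {a : String}
    (h : pvMIdx atoms k rest = some (j, a)) :
    a.toList.isPrefixOf rest = true ∧ pvFIdx atoms k a = some j ∧ a ∈ atoms := by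
  induction atoms generalizing k with
  | nil => simp [pvMIdx] at h
  | cons x xs ih =>
    simp only [pvMIdx] at h
    split at h
    · next hp =>
      obtain ⟨hj, hx⟩ : j = (k : Int) ∧ x = a := by
        constructor <;> · injection h with h'; cases h'; rfl
      subst hx
      exact ⟨hp, by simp [pvFIdx, hj], List.mem_cons_self ..⟩
    · next hp =>
      obtain ⟨hpa, hf, hmem⟩ := ih h
      have hxa : x ≠ a := by intro h'; subst h'; exact hp hpa
      exact ⟨hpa, by simp [pvFIdx, hxa, hf], List.mem_cons_of_mem _ hmem⟩

theorem pvMIdx_min {atoms : List String} {k : Nat} {rest : List Char} {j : Int} {a : String}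
    (h : pvMIdx atoms k rest = some (j, a)) :
    ∀ b j', b.toList.isPrefixOf rest = true → pvFIdx atoms k b = some j' → j ≤ j' ∧ (j' = j → b = a) := by
  induction atoms generalizing k with
  | nil => simp [pvMIdx] at h
  | cons x xs ih =>
    intro b j' hpb hf
    simp only [pvMIdx] at h
    simp only [pvFIdx] at hf
    split at h
    · next hp =>
      obtain ⟨hj, hx⟩ : j = (k : Int) ∧ x = a := by
        constructor <;> · injection h with h'; cases h'; rfl
      subst hj; subst hx
      split at hf
      · next hab => injection hf with hf'; exact ⟨le_of_eq hf', fun _ => hab.symm⟩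
      · have := pvFIdx_lb hf
        constructor
        · omega
        · intro he; omega
    · next hp =>
      split at hf
      · next hxb => subst hxb; exact absurd hpb hp
      · exact ih h b j' hpb hf

theorem pvMIdx_none {atoms : List String} {k : Nat} {rest : List Char}
    (h : pvMIdx atoms k rest = none) :
    ∀ b j, pvFIdx atoms k b = some j → b.toList.isPrefixOf rest = false := by
  induction atoms generalizing k with
  | nil => intro b j hf; simp [pvFIdx] at hf
  | cons x xs ih =>
    intro b j hf
    simp only [pvMIdx] at h
    split at h
    · exact absurd h (by simp)
    · next hp =>
      simp only [pvFIdx] at hf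
      split at hf
      · next hxb => subst hxb; exact Bool.eq_false_iff.mpr hp
      · exact ih h b j hf

theorem pvFindAtomA_eq_mIdx (rest : List Char) : ∀ (atoms : List String) (k : Nat),
    pvFindAtomA rest atoms = (pvMIdx atoms k rest).map (·.2) := by
  intro atoms
  induction atoms with
  | nil => intro k; rfl
  | cons a as ih =>
    intro k
    simp only [pvFindAtomA, pvMIdx]
    split <;> simp [ih (k + 1)]

-- membership in B's length list
theorem mem_pvLengths {atoms : List String} {l : Nat} :
    l ∈ pvLengths atoms ↔ ∃ a ∈ atoms, a.toList ≠ [] ∧ a.toList.length = l := by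
  unfold pvLengths
  rw [PySem.List.mem_sorted, PySem.Set.mem_ofList]
  simp [List.mem_filter, List.mem_map]
  constructor
  · rintro ⟨a, ⟨ha, hne⟩, hl⟩; exact ⟨a, ha, by simpa using hne, hl⟩
  · rintro ⟨a, ha, hne, hl⟩; exact ⟨a, ⟨ha, by simpa using hne⟩, hl⟩

-- once the best is the minimum, the fold keeps it
theorem pvFold_keep (prio : PySem.Dict String Int) (rest : List Char) (j0 : Int) (a : String) :
    ∀ (L : List Nat),
      (∀ l ∈ L, l ≤ rest.length → ∀ j, prio.get? (String.ofList (rest.take l)) = some j → j0 ≤ j) →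
      L.foldl (pvStepB prio rest) (some (j0, a)) = some (j0, a) := by
  intro L
  induction L with
  | nil => intro _; rfl
  | cons l ls ih =>
    intro hcand
    have hstep : pvStepB prio rest (some (j0, a)) l = some (j0, a) := by
      unfold pvStepB
      split
      · next hl =>
        cases hg : prio.get? (String.ofList (rest.take l)) with
        | none => rfl
        | some j =>
          have := hcand l (List.mem_cons_self ..) hl j hg
          simp [not_lt.mpr this]
      · rfl
    simpa [List.foldl, hstep] using ih (fun l' hl' => hcand l' (List.mem_cons_of_mem _ hl'))

-- if no length yields a candidate, the fold is the identity
theorem pvFold_none (prio : PySem.Dict String Int) (rest : List Char) :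
    ∀ (L : List Nat) (b0 : Option (Int × String)),
      (∀ l ∈ L, l ≤ rest.length → prio.get? (String.ofList (rest.take l)) = none) →
      L.foldl (pvStepB prio rest) b0 = b0 := by
  intro L
  induction L with
  | nil => intro b0 _; rfl
  | cons l ls ih =>
    intro b0 hnone
    have hstep : pvStepB prio rest b0 l = b0 := by
      unfold pvStepB
      split
      · next hl => rw [hnone l (List.mem_cons_self ..) hl]
      · rfl
    rw [List.foldl, hstep]
    exact ih b0 (fun l' hl' => hnone l' (List.mem_cons_of_mem _ hl'))

-- the fold computes the minimal-index candidate
theorem pvFold_min (prio : PySem.Dict String Int) (rest : List Char) (j0 : Int) (a : String) :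
    ∀ (L : List Nat),
      (∀ l ∈ L, l ≤ rest.length → ∀ j, prio.get? (String.ofList (rest.take l)) = some j →
        j0 ≤ j ∧ (j = j0 → String.ofList (rest.take l) = a)) →
      (∃ l ∈ L, l ≤ rest.length ∧ prio.get? (String.ofList (rest.take l)) = some j0) →
      ∀ (b0 : Option (Int × String)),
        (b0 = none ∨ ∃ jb sb, b0 = some (jb, sb) ∧ j0 ≤ jb ∧ (jb = j0 → sb = a)) →
        L.foldl (pvStepB prio rest) b0 = some (j0, a) := by
  intro L
  induction L with
  | nil => rintro _ ⟨l, hl, _⟩ _ _; simp at hl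
  | cons l ls ih =>
    intro hcand hex b0 hb0
    have hcand' := fun l' hl' => hcand l' (List.mem_cons_of_mem _ hl')
    rw [List.foldl]
    rcases hex with ⟨lw, hlw, hlwlen, hlwget⟩
    rcases List.mem_cons.mp hlw with hhead | htail
    · -- the witness length is the head: after this step the accumulator is the minimum
      subst hhead
      have hpiece : String.ofList (rest.take lw) = a :=
        (hcand lw (List.mem_cons_self ..) hlwlen j0 hlwget).2 rfl
      have hstep : pvStepB prio rest b0 lw = some (j0, a) := by
        unfold pvStepB
        rw [if_pos hlwlen, hlwget]
        rcases hb0 with rfl | ⟨jb, sb, rfl, hle, heq⟩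
        · rw [hpiece]
        · rcases lt_or_eq_of_le hle with hlt | hbe
          · simp [hlt, hpiece]
          · simp [heq hbe.symm, ← hbe]
      rw [hstep]
      exact pvFold_keep prio rest j0 a ls (fun l' hl' hlen j hg => (hcand' l' hl' hlen j hg).1)
    · -- the witness is in the tail: the step preserves the invariant
      have hinv : pvStepB prio rest b0 l = none ∨
          ∃ jb sb, pvStepB prio rest b0 l = some (jb, sb) ∧ j0 ≤ jb ∧ (jb = j0 → sb = a) := by
        unfold pvStepB
        split
        · next hl =>
          cases hg : prio.get? (String.ofList (rest.take l)) with
          | none => exact hb0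
          | some j =>
            have hj := hcand l (List.mem_cons_self ..) hl j hg
            rcases hb0 with rfl | ⟨jb, sb, rfl, hle, heq⟩
            · exact Or.inr ⟨j, _, rfl, hj.1, fun he => hj.2 he⟩
            · by_cases hlt : j < jb
              · exact Or.inr ⟨j, _, by simp [hlt], hj.1, fun he => hj.2 he⟩
              · exact Or.inr ⟨jb, sb, by simp [hlt], hle, heq⟩
        · exact hb0
      exact ih hcand' ⟨lw, htail, hlwlen, hlwget⟩ _ hinv

-- per position, B's best candidate carries exactly the atom A's first-match scan finds
theorem pvBestB_eq_find (atoms : List String) (hne : "" ∉ atoms) (rest : List Char) :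
    (pvBestB (pvBuildPrio atoms 0 PySem.Dict.empty) rest (pvLengths atoms)).map (·.2) =
      pvFindAtomA rest atoms := by
  have hget : ∀ b, (pvBuildPrio atoms 0 PySem.Dict.empty).get? b = pvFIdx atoms 0 b := by
    intro b
    rw [pvBuildPrio_get b atoms 0 PySem.Dict.empty]
    simp [PySem.Dict.get?_empty]
  rw [pvFindAtomA_eq_mIdx rest atoms 0]
  cases hm : pvMIdx atoms 0 rest with
  | none =>
    have hzero : pvBestB (pvBuildPrio atoms 0 PySem.Dict.empty) rest (pvLengths atoms) = none := by
      unfold pvBestB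
      apply pvFold_none
      intro l _ hl
      rw [hget]
      cases hg : pvFIdx atoms 0 (String.ofList (rest.take l)) with
      | none => rfl
      | some j =>
        have hpfx : (String.ofList (rest.take l)).toList.isPrefixOf rest = true := by
          simp [List.isPrefixOf_iff_prefix, List.take_prefix]
        rw [pvMIdx_none hm _ j hg] at hpfx
        simp at hpfx
    rw [hzero]
  | some p =>
    obtain ⟨j0, a⟩ := p
    obtain ⟨hpa, hfa, hmem⟩ := pvMIdx_fIdx hm
    have hane : a.toList ≠ [] := by
      intro h
      exact hne (by simpa [show a = "" from String.toList_inj.mp (by simpa using h)] using hmem)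
    have hprefix : a.toList <+: rest := List.isPrefixOf_iff_prefix.mp hpa
    have htake : rest.take a.toList.length = a.toList := (List.prefix_iff_eq_take.mp hprefix).symm
    have hbest : pvBestB (pvBuildPrio atoms 0 PySem.Dict.empty) rest (pvLengths atoms) = some (j0, a) := by
      unfold pvBestB
      apply pvFold_min
      · intro l _ hl j hg
        rw [hget] at hg
        have hpfx : (String.ofList (rest.take l)).toList.isPrefixOf rest = true := by
          simp [List.isPrefixOf_iff_prefix, List.take_prefix]
        have := pvMIdx_min hm _ j hpfx hg
        exact ⟨this.1, this.2⟩
      · refine ⟨a.toList.length, ?_, hprefix.length_le, ?_⟩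
        · exact mem_pvLengths.mpr ⟨a, hmem, hane, rfl⟩
        · rw [hget, htake]
          simpa using hfa
      · exact Or.inl rfl
    rw [hbest]

theorem pvLoopA_eq_pvLoopB (atoms : List String) (hne : "" ∉ atoms) :
    ∀ (fuel : Nat) (rest : List Char) (res unres : List String),
      pvLoopA atoms fuel rest res unres =
        pvLoopB (pvBuildPrio atoms 0 PySem.Dict.empty) (pvLengths atoms) fuel rest res unres := by
  intro fuel
  induction fuel with
  | zero => intro rest res unres; rfl
  | succ n ih =>
    intro rest res unres
    cases rest with
    | nil => rfl
    | cons c cs =>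
      have hkey := pvBestB_eq_find atoms hne (c :: cs)
      simp only [pvLoopA, pvLoopB]
      cases hb : pvBestB (pvBuildPrio atoms 0 PySem.Dict.empty) (c :: cs) (pvLengths atoms) with
      | none =>
        rw [hb] at hkey
        rw [← hkey]
        exact ih ..
      | some p =>
        obtain ⟨j, b⟩ := p
        rw [hb] at hkey
        rw [← hkey]
        exact ih ..

-- ===== VERDICT (by name: the statement is the Claim_ definition above) =====
theorem decompose_sequence_with_atoms_py_spec : Claim_equal_decompose_sequence_with_atoms_py := by
  intro sequence atomic_keys _hdom hpre
  unfold Spec_decompose_sequence_with_atoms_py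
  unfold decompose_sequence_with_atoms_py decompose_sequence_with_atoms_py_alt
  rcases hpre with hseq | hnomem
  · subst hseq
    simp [pvLoopA, pvLoopB]
  · exact pvLoopA_eq_pvLoopB atomic_keys hnomem _ _ [] []
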